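-- pv_equiv track=rewrite | github.com/rakeshvar/penrose_diffusion | hex_rings.py | get_hex_ring
-- ===== SOURCE A (Python) =====
-- def get_color(q, r, s):
--     """
--     A coloring scheme such that no 'dark' hexagons touch each other.
--     Returns 1 for 'dark' color, 0 for 'light' color.
--     """
--     return int((max(abs(q), abs(r), abs(s)) + min(abs(q), abs(r), abs(s))) % 3 == 0)
--
-- def get_hex_ring(degree):
--     """
--     Generate hexes at exactly distance 'degree' from origin with 2-coloring.
--     Returns list of tuples (q, r, s, color) in circular order.
--     """
--     if degree == 0:
--         return [(0, 0, 0, get_color(0, 0, 0))]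
--
--     hexes = []
--     q, r, s = 0, -degree, degree
--
--     directions = [
--         (1, 0, -1),   # East
--         (0, 1, -1),   # Southeast
--         (-1, 1, 0),   # Southwest
--         (-1, 0, 1),   # West
--         (0, -1, 1),   # Northwest
--         (1, -1, 0),   # Northeast
--     ]
--
--     for direction_idx in range(6):
--         dq, dr, ds = directions[direction_idx]
--         for step in range(degree):
--             hexes.append((q, r, s, get_color(q, r, s)))
--             q += dq
--             r += dr
--             s += ds
--
--     return hexes
-- ===== SOURCE B (Python) =====
-- def get_color(q, r, s):
--     """
--     A coloring scheme such that no 'dark' hexagons touch each other.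
--     Returns 1 for 'dark' color, 0 for 'light' color.
--     """
--     return int((max(abs(q), abs(r), abs(s)) + min(abs(q), abs(r), abs(s))) % 3 == 0)
--
-- def get_hex_ring(degree):
--     """
--     Generate hexes at exactly distance 'degree' from origin with 2-coloring.
--     Returns list of tuples (q, r, s, color) in circular order.
--     """
--     if degree == 0:
--         return [(0, 0, 0, get_color(0, 0, 0))]
--
--     directions = [
--         (1, 0, -1),   # East
--         (0, 1, -1),   # Southeast
--         (-1, 1, 0),   # Southwest
--         (-1, 0, 1),   # West
--         (0, -1, 1),   # Northwest
--         (1, -1, 0),   # Northeast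
--     ]
--
--     # Precompute the six ring corners (starting corner of each direction segment).
--     corner = (0, -degree, degree)
--     corners = [corner]
--     for dq, dr, ds in directions[:5]:
--         corner = (corner[0] + degree * dq, corner[1] + degree * dr, corner[2] + degree * ds)
--         corners.append(corner)
--
--     # Emit each tile directly from its index: no running accumulator.
--     hexes = []
--     for i in range(6 * degree):
--         d, step = divmod(i, degree)
--         cq, cr, cs = corners[d]
--         dq, dr, ds = directions[d]
--         q, r, s = cq + step * dq, cr + step * dr, cs + step * ds
--         hexes.append((q, r, s, get_color(q, r, s)))
--     return hexes
-- ===== Notes on version B (the rewrite author's own statement) =====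
-- stated objective: alternative
-- what changed: Replaces A's mutable step-by-step walk (running q,r,s mutated across two nested loops) by precomputing the six ring corners and emitting each tile directly from its flat index i via divmod(i, degree) and multiply-add arithmetic.
import Mathlib
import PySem

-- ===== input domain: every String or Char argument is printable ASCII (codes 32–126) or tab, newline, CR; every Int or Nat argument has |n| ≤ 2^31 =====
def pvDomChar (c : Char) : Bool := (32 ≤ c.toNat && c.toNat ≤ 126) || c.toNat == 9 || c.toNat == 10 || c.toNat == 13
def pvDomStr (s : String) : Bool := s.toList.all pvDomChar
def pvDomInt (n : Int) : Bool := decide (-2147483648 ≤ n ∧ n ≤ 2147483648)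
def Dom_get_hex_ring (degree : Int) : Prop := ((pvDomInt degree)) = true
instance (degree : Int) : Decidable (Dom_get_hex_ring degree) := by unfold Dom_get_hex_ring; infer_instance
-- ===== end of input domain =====

-- B replaces A's mutable step-by-step walk with precomputed ring corners and direct
-- index-to-coordinate arithmetic (divmod on a single flat index); alternative decomposition, same cost.

-- ===== PORT A =====
def get_color (q r s : Int) : Int :=
  if PySem.Int.mod (max (max |q| |r|) |s| + min (min |q| |r|) |s|) 3 == 0 then 1 else 0

def directionsA : List (Int × Int × Int) :=
  [(1, 0, -1), (0, 1, -1), (-1, 1, 0), (-1, 0, 1), (0, -1, 1), (1, -1, 0)]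

def get_hex_ring (degree : Int) : List (Int × Int × Int × Int) :=
  if degree = 0 then [(0, 0, 0, get_color 0 0 0)]
  else
    -- for direction_idx in range(6): … — range(6) walks exactly the directions list, so we fold over it
    (directionsA.foldl (fun (st : List (Int × Int × Int × Int) × Int × Int × Int) dir =>
        (PySem.List.pyRange 0 degree 1).foldl (fun st2 _step =>
            (st2.1 ++ [(st2.2.1, st2.2.2.1, st2.2.2.2, get_color st2.2.1 st2.2.2.1 st2.2.2.2)],
             st2.2.1 + dir.1, st2.2.2.1 + dir.2.1, st2.2.2.2 + dir.2.2)) st)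
      ([], 0, -degree, degree)).1

-- ===== PORT B =====
def directionsB : List (Int × Int × Int) :=
  [(1, 0, -1), (0, 1, -1), (-1, 1, 0), (-1, 0, 1), (0, -1, 1), (1, -1, 0)]

def get_hex_ring_alt (degree : Int) : List (Int × Int × Int × Int) :=
  if degree = 0 then [(0, 0, 0, get_color 0 0 0)]
  else
    let c0 : Int × Int × Int := (0, -degree, degree)
    let cornersSt := (directionsB.take 5).foldl
      (fun (st : List (Int × Int × Int) × (Int × Int × Int)) dir =>
        let c := (st.2.1 + degree * dir.1, st.2.2.1 + degree * dir.2.1, st.2.2.2 + degree * dir.2.2)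
        (st.1 ++ [c], c))
      ([c0], c0)
    let corners := cornersSt.1
    (PySem.List.pyRange 0 (6 * degree) 1).map (fun i =>
      let d := PySem.Int.floordiv i degree
      let step := PySem.Int.mod i degree
      let c := PySem.List.pyGetD corners d (0, 0, 0)       -- corners[d]; d ∈ [0,6) so always in range
      let dir := PySem.List.pyGetD directionsB d (0, 0, 0) -- directions[d]
      let q := c.1 + step * dir.1
      let r := c.2.1 + step * dir.2.1
      let s := c.2.2 + step * dir.2.2
      (q, r, s, get_color q r s))

-- ===== PRECONDITION & SPEC =====
def Spec_get_hex_ring (degree : Int) (out : List (Int × Int × Int × Int)) : Prop := out = get_hex_ring_alt degree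
instance (degree : Int) (out : List (Int × Int × Int × Int)) : Decidable (Spec_get_hex_ring degree out) := by unfold Spec_get_hex_ring; infer_instance

-- ===== CLAIM (what is proved, stated in full; the proofs are below) =====
def Claim_equal_get_hex_ring : Prop := ∀ (degree : Int), Dom_get_hex_ring degree → Spec_get_hex_ring degree (get_hex_ring degree)

-- ===== LEMMAS AND PROOFS =====

-- one tile with its color
def hexAt (q r s : Int) : Int × Int × Int × Int := (q, r, s, get_color q r s)

-- the segment of n tiles starting at corner c in direction dir
def segN (n : Nat) (c dir : Int × Int × Int) : List (Int × Int × Int × Int) :=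
  (List.range n).map (fun (k : Nat) =>
    hexAt (c.1 + (k : Int) * dir.1) (c.2.1 + (k : Int) * dir.2.1) (c.2.2 + (k : Int) * dir.2.2))

-- A's inner loop = one segment, advancing the walker to the next corner
theorem innerA_eq (n : Nat) (dq dr ds : Int) (acc : List (Int × Int × Int × Int)) (q r s : Int) :
    (List.range n).foldl (fun (st2 : List (Int × Int × Int × Int) × Int × Int × Int) (_ : Nat) =>
        (st2.1 ++ [(st2.2.1, st2.2.2.1, st2.2.2.2, get_color st2.2.1 st2.2.2.1 st2.2.2.2)],
         st2.2.1 + dq, st2.2.2.1 + dr, st2.2.2.2 + ds)) (acc, q, r, s)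
      = (acc ++ segN n (q, r, s) (dq, dr, ds), q + n * dq, r + n * dr, s + n * ds) := by
  induction n with
  | zero => simp [segN]
  | succ m ih =>
      rw [List.range_succ, List.foldl_append, ih]
      simp only [List.foldl_cons, List.foldl_nil, Prod.mk.injEq]
      refine ⟨?_, by push_cast; ring, by push_cast; ring, by push_cast; ring⟩
      simp [segN, List.range_succ, hexAt]

-- the canonical ring: six segments from the six corners
def ringSpec (n : Nat) : List (Int × Int × Int × Int) :=
  segN n (0, -(n:Int), (n:Int)) (1, 0, -1) ++ segN n ((n:Int), -(n:Int), 0) (0, 1, -1) ++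
  segN n ((n:Int), 0, -(n:Int)) (-1, 1, 0) ++ segN n (0, (n:Int), -(n:Int)) (-1, 0, 1) ++
  segN n (-(n:Int), (n:Int), 0) (0, -1, 1) ++ segN n (-(n:Int), 0, (n:Int)) (1, -1, 0)

theorem A_pos (n : Nat) (hn : 0 < n) : get_hex_ring (n : Int) = ringSpec n := by
  unfold get_hex_ring
  rw [if_neg (by exact_mod_cast hn.ne')]
  rw [PySem.List.pyRange_one, show (((n:Nat):Int) - 0).toNat = n by omega]
  simp only [directionsA, List.foldl_cons, List.foldl_nil, List.foldl_map, innerA_eq]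
  simp [ringSpec]

theorem map_range_mul {α : Type} (m n : Nat) (g : Nat → α) :
    (List.range (m*n)).map g
      = (List.range m).flatMap (fun d => (List.range n).map (fun j => g (d*n + j))) := by
  induction m with
  | zero => simp
  | succ k ih =>
      rw [show (k+1)*n = k*n + n by ring, List.range_add, List.map_append, List.map_map,
          List.range_succ, List.flatMap_append, ih]
      simp [Function.comp]

theorem B_pos (n : Nat) (hn : 0 < n) : get_hex_ring_alt (n : Int) = ringSpec n := by
  unfold get_hex_ring_alt
  rw [if_neg (by exact_mod_cast hn.ne')]
  simp only [directionsB, List.take, List.foldl_cons, List.foldl_nil]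
  rw [show (6 * ((n:Nat):Int)) = ((6*n : Nat) : Int) by push_cast; ring]
  rw [PySem.List.pyRange_one, show (((6*n:Nat):Int) - 0).toNat = 6*n by omega, List.map_map]
  rw [map_range_mul 6 n]
  rw [show List.range 6 = [0,1,2,3,4,5] from rfl]
  simp only [List.flatMap_cons, List.flatMap_nil, List.append_nil]
  simp only [ringSpec, List.append_assoc]
  congr 1
  · simp only [segN, hexAt]
    apply List.map_congr_left
    intro j hj
    rw [List.mem_range] at hj
    simp only [Function.comp_apply, zero_add]
    have hdiv : (0*n + j)/n = 0 := by
      rw [show 0*n+j = n*0+j by ring, Nat.mul_add_div hn, Nat.div_eq_of_lt hj]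
    have hmod : (0*n + j)%n = j := by
      rw [show 0*n+j = n*0+j by ring, Nat.mul_add_mod]; exact Nat.mod_eq_of_lt hj
    have hfd : PySem.Int.floordiv ((0*n+j : Nat) : Int) ((n : Nat) : Int) = (0 : Int) := by
      rw [PySem.Int.floordiv_natCast, hdiv]; norm_num
    have hfm : PySem.Int.mod ((0*n+j : Nat) : Int) ((n : Nat) : Int) = (j : Int) := by
      rw [PySem.Int.mod_natCast, hmod]
    simp only [hfd, hfm]
    simp [PySem.List.pyGetD, PySem.List.pyGet?, PySem.List.pyIdx?]
  congr 1
  · simp only [segN, hexAt]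
    apply List.map_congr_left
    intro j hj
    rw [List.mem_range] at hj
    simp only [Function.comp_apply, zero_add]
    have hdiv : (1*n + j)/n = 1 := by
      rw [show 1*n+j = n*1+j by ring, Nat.mul_add_div hn, Nat.div_eq_of_lt hj]
    have hmod : (1*n + j)%n = j := by
      rw [show 1*n+j = n*1+j by ring, Nat.mul_add_mod]; exact Nat.mod_eq_of_lt hj
    have hfd : PySem.Int.floordiv ((1*n+j : Nat) : Int) ((n : Nat) : Int) = (1 : Int) := by
      rw [PySem.Int.floordiv_natCast, hdiv]; norm_num
    have hfm : PySem.Int.mod ((1*n+j : Nat) : Int) ((n : Nat) : Int) = (j : Int) := by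
      rw [PySem.Int.mod_natCast, hmod]
    simp only [hfd, hfm]
    simp [PySem.List.pyGetD, PySem.List.pyGet?, PySem.List.pyIdx?]
  congr 1
  · simp only [segN, hexAt]
    apply List.map_congr_left
    intro j hj
    rw [List.mem_range] at hj
    simp only [Function.comp_apply, zero_add]
    have hdiv : (2*n + j)/n = 2 := by
      rw [show 2*n+j = n*2+j by ring, Nat.mul_add_div hn, Nat.div_eq_of_lt hj]
    have hmod : (2*n + j)%n = j := by
      rw [show 2*n+j = n*2+j by ring, Nat.mul_add_mod]; exact Nat.mod_eq_of_lt hj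
    have hfd : PySem.Int.floordiv ((2*n+j : Nat) : Int) ((n : Nat) : Int) = (2 : Int) := by
      rw [PySem.Int.floordiv_natCast, hdiv]; norm_num
    have hfm : PySem.Int.mod ((2*n+j : Nat) : Int) ((n : Nat) : Int) = (j : Int) := by
      rw [PySem.Int.mod_natCast, hmod]
    simp only [hfd, hfm]
    simp [PySem.List.pyGetD, PySem.List.pyGet?, PySem.List.pyIdx?]
  congr 1
  · simp only [segN, hexAt]
    apply List.map_congr_left
    intro j hj
    rw [List.mem_range] at hj
    simp only [Function.comp_apply, zero_add]
    have hdiv : (3*n + j)/n = 3 := by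
      rw [show 3*n+j = n*3+j by ring, Nat.mul_add_div hn, Nat.div_eq_of_lt hj]
    have hmod : (3*n + j)%n = j := by
      rw [show 3*n+j = n*3+j by ring, Nat.mul_add_mod]; exact Nat.mod_eq_of_lt hj
    have hfd : PySem.Int.floordiv ((3*n+j : Nat) : Int) ((n : Nat) : Int) = (3 : Int) := by
      rw [PySem.Int.floordiv_natCast, hdiv]; norm_num
    have hfm : PySem.Int.mod ((3*n+j : Nat) : Int) ((n : Nat) : Int) = (j : Int) := by
      rw [PySem.Int.mod_natCast, hmod]
    simp only [hfd, hfm]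
    simp [PySem.List.pyGetD, PySem.List.pyGet?, PySem.List.pyIdx?]
  congr 1
  · simp only [segN, hexAt]
    apply List.map_congr_left
    intro j hj
    rw [List.mem_range] at hj
    simp only [Function.comp_apply, zero_add]
    have hdiv : (4*n + j)/n = 4 := by
      rw [show 4*n+j = n*4+j by ring, Nat.mul_add_div hn, Nat.div_eq_of_lt hj]
    have hmod : (4*n + j)%n = j := by
      rw [show 4*n+j = n*4+j by ring, Nat.mul_add_mod]; exact Nat.mod_eq_of_lt hj
    have hfd : PySem.Int.floordiv ((4*n+j : Nat) : Int) ((n : Nat) : Int) = (4 : Int) := by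
      rw [PySem.Int.floordiv_natCast, hdiv]; norm_num
    have hfm : PySem.Int.mod ((4*n+j : Nat) : Int) ((n : Nat) : Int) = (j : Int) := by
      rw [PySem.Int.mod_natCast, hmod]
    simp only [hfd, hfm]
    simp [PySem.List.pyGetD, PySem.List.pyGet?, PySem.List.pyIdx?]
  simp only [segN, hexAt]
  apply List.map_congr_left
  intro j hj
  rw [List.mem_range] at hj
  simp only [Function.comp_apply, zero_add]
  have hdiv : (5*n + j)/n = 5 := by
    rw [show 5*n+j = n*5+j by ring, Nat.mul_add_div hn, Nat.div_eq_of_lt hj]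
  have hmod : (5*n + j)%n = j := by
    rw [show 5*n+j = n*5+j by ring, Nat.mul_add_mod]; exact Nat.mod_eq_of_lt hj
  have hfd : PySem.Int.floordiv ((5*n+j : Nat) : Int) ((n : Nat) : Int) = (5 : Int) := by
    rw [PySem.Int.floordiv_natCast, hdiv]; norm_num
  have hfm : PySem.Int.mod ((5*n+j : Nat) : Int) ((n : Nat) : Int) = (j : Int) := by
    rw [PySem.Int.mod_natCast, hmod]
  simp only [hfd, hfm]
  simp [PySem.List.pyGetD, PySem.List.pyGet?, PySem.List.pyIdx?]

theorem get_hex_ring_spec : Claim_equal_get_hex_ring := by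
  intro degree _
  unfold Spec_get_hex_ring
  rcases lt_trichotomy degree 0 with h | h | h
  · simp only [get_hex_ring, get_hex_ring_alt, if_neg h.ne]
    rw [PySem.List.pyRange_one_eq_nil (by omega), PySem.List.pyRange_one_eq_nil (by omega)]
    simp [directionsA]
  · subst h; rfl
  · have hd : degree = ((degree.toNat : Nat) : Int) := by omega
    rw [hd, A_pos degree.toNat (by omega), B_pos degree.toNat (by omega)]
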